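-- pv_equiv track=rewrite | github.com/PennLINC/grmpy_opendata | phenotype/03_separate_self_reports.py | is_item_column
-- ===== SOURCE A (Python) =====
-- from typing import Dict, Iterable, List, Mapping, Tuple
--
-- PARTICIPANT_ID_COL = "participant_id"
--
-- def split_tokens(name: str) -> List[str]:
--     return [t for t in name.split("_") if t != ""]
--
-- def is_item_column(column: str) -> bool:
--     """Heuristic: a column is an item column if it has any token after the
--     instrument prefix that starts with a digit. This captures patterns like:
--     - aces_1
--     - hcl16_3_1
--     - eswan_dmdd_01a
--     - grit_15___2
--     """
--     tokens = split_tokens(column.lower())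
--     # Skip leading participant_id and clearly non-instrument roots
--     if not tokens or tokens[0] == PARTICIPANT_ID_COL:
--         return False
--     # Find first token starting with a digit
--     for token in tokens:
--         if token and token[0].isdigit():
--             return True
--     return False
-- ===== SOURCE B (Python) =====
-- def is_item_column(column: str) -> bool:
--     """Single pass over the characters: a digit found at a token boundary
--     (string start or right after an underscore) means an item column."""
--     boundary = True
--     for ch in column:
--         if boundary and ch.isdigit():
--             return True
--         boundary = ch == "_"
--     return False
-- ===== Notes on version B (the rewrite author's own statement) =====
-- stated objective: simpler
-- what changed: Replaced lowercasing + split-on-underscore + token filtering + a loop over the token list with a single character scan keeping an at-token-boundary flag; no token list is materialized and the dead participant_id check disappears.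
import Mathlib
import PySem

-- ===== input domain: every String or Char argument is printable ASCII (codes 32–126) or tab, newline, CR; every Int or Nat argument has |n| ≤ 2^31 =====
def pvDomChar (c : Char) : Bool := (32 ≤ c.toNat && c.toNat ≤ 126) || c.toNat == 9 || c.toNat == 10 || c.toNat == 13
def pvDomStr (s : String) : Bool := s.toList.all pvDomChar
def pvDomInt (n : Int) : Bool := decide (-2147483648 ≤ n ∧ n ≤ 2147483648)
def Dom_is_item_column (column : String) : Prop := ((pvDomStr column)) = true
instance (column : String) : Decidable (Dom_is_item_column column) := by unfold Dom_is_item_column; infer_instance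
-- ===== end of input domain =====

-- B replaces lowercase + split-into-tokens + token loop by a single character scan with a boundary flag (objective: simpler).

-- ===== PORT A =====
def split_tokens (name : String) : List String :=
  ((PySem.Str.split? name "_").getD []).filter (fun t => !(t == ""))

-- the `for token in tokens: if token and token[0].isdigit(): return True` loop
def findDigitTok : List String → Bool
  | [] => false
  | t :: rest =>
    if (!(t == "")) && ((PySem.Str.pyGet? t 0).elim false PySem.Chars.isdigit) then true
    else findDigitTok rest

def is_item_column (column : String) : Bool :=
  let tokens := split_tokens (PySem.Str.lower column)
  if tokens.isEmpty || tokens.head? == some "participant_id" then false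
  else findDigitTok tokens

-- ===== PORT B =====
def scanDigit : List Char → Bool → Bool
  | [], _ => false
  | c :: rest, boundary =>
    if boundary && PySem.Chars.isdigit c then true
    else scanDigit rest (c == '_')

def is_item_column_alt (column : String) : Bool := scanDigit column.toList true

-- ===== PRECONDITION & SPEC =====
def Spec_is_item_column (column : String) (out : Bool) : Prop := out = is_item_column_alt column
instance (column : String) (out : Bool) : Decidable (Spec_is_item_column column out) := by unfold Spec_is_item_column; infer_instance

-- ===== CLAIM (what is proved, stated in full; the proofs are below) =====
def Claim_equal_is_item_column : Prop := ∀ (column : String), Dom_is_item_column column → Spec_is_item_column column (is_item_column column)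

-- ===== LEMMAS AND PROOFS =====

-- structural version of splitting on a single underscore (proof-side only)
def splitU : List Char → List Char → List (List Char)
  | [], cur => [cur.reverse]
  | c :: rest, cur => if c = '_' then cur.reverse :: splitU rest [] else splitU rest (c :: cur)

-- head-of-token digit test
def headDigit : List Char → Bool
  | [] => false
  | c :: _ => PySem.Chars.isdigit c

lemma splitOn_go_eq_splitU (fuel : Nat) (l cur : List Char) (acc : List (List Char))
    (h : l.length < fuel) :
    PySem.Chars.splitOn.go ['_'] fuel l cur acc = acc.reverse ++ splitU l cur := by
  induction fuel generalizing l cur acc with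
  | zero => omega
  | succ n ih =>
    cases l with
    | nil => simp [PySem.Chars.splitOn.go, splitU]
    | cons c rest =>
      rw [PySem.Chars.splitOn.go]
      by_cases hc : c = '_'
      · subst hc
        rw [if_pos (by simp [List.isPrefixOf])]
        rw [ih _ _ _ (by simpa using Nat.lt_of_succ_lt_succ h)]
        simp [splitU]
      · rw [if_neg (by simp; exact fun hh => hc hh.symm)]
        rw [ih _ _ _ (by simpa using Nat.lt_of_succ_lt_succ h)]
        simp [splitU, hc]

lemma splitOn_underscore (l : List Char) :
    PySem.Chars.splitOn l ['_'] = splitU l [] := by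
  unfold PySem.Chars.splitOn
  rw [splitOn_go_eq_splitU _ _ _ _ (by omega)]
  simp

lemma no_underscore_splitU (l cur : List Char) (hc : '_' ∉ cur) :
    ∀ t ∈ splitU l cur, '_' ∉ t := by
  induction l generalizing cur with
  | nil =>
    intro t ht
    simp only [splitU, List.mem_singleton] at ht
    subst ht
    simpa using hc
  | cons c rest ih =>
    intro t ht
    by_cases h : c = '_'
    · subst h
      rw [show splitU ('_' :: rest) cur = cur.reverse :: splitU rest [] from by simp [splitU]] at ht
      rcases List.mem_cons.mp ht with rfl | ht'
      · simpa using hc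
      · exact ih [] (by simp) t ht'
    · simp only [splitU, if_neg h] at ht
      exact ih (c :: cur) (by simp [hc]; exact fun hh => h hh.symm) t ht

lemma scan_main (l cur : List Char) :
    ((splitU l cur).filter (fun t => !(t == []))).any headDigit
      = (headDigit cur.reverse || scanDigit l cur.isEmpty) := by
  induction l generalizing cur with
  | nil =>
    cases cur with
    | nil => simp [splitU, scanDigit, headDigit]
    | cons a as => simp [splitU, scanDigit, headDigit]
  | cons c rest ih =>
    by_cases hc : c = '_'
    · subst hc
      have e : splitU ('_' :: rest) cur = cur.reverse :: splitU rest [] := by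
        simp [splitU]
      have hscan : scanDigit ('_' :: rest) cur.isEmpty = scanDigit rest true := by
        cases cur <;> simp [scanDigit, PySem.Chars.isdigit]
      rw [e, List.filter_cons, hscan]
      by_cases hcur : cur = []
      · subst hcur
        simpa using (ih [])
      · have h1 : (!(cur.reverse == ([] : List Char))) = true := by simp [hcur]
        rw [if_pos h1, List.any_cons]
        have hh := ih []
        simp only [List.reverse_nil, List.isEmpty_nil] at hh
        rw [hh]
        simp [headDigit]
    · have e : splitU (c :: rest) cur = splitU rest (c :: cur) := by
        simp [splitU, hc]
      rw [e, ih]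
      have hcu : ((c == '_') = false) := by simpa using hc
      cases cur with
      | nil =>
        simp only [List.reverse_cons, List.reverse_nil, List.nil_append, List.isEmpty_cons,
          List.isEmpty_nil, scanDigit, hcu, Bool.true_and]
        cases hd : PySem.Chars.isdigit c <;> simp [headDigit, hd]
      | cons a as =>
        have hhead : ∀ (xs : List Char) (d : Char), xs ≠ [] → headDigit (xs ++ [d]) = headDigit xs := by
          intro xs d hxs
          cases xs with
          | nil => exact absurd rfl hxs
          | cons x xt => simp [headDigit]
        simp only [List.reverse_cons, List.isEmpty_cons, scanDigit, hcu]
        rw [hhead (as.reverse ++ [a]) c (by simp)]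
        simp

lemma toNat_ofNat_valid (n : Nat) (h : n < 55296) : (Char.ofNat n).toNat = n := by
  have hv : Nat.isValidChar n := Or.inl h
  simp [Char.ofNat, hv]

lemma upper_bounds {c : Char} (hu : PySem.Chars.isupper c = true) :
    65 ≤ c.toNat ∧ c.toNat ≤ 90 := by
  unfold PySem.Chars.isupper at hu
  simp only [Bool.and_eq_true, decide_eq_true_eq] at hu
  exact ⟨hu.1, hu.2⟩

lemma isdigit_lowerChar (c : Char) :
    PySem.Chars.isdigit (PySem.Chars.lowerChar c) = PySem.Chars.isdigit c := by
  unfold PySem.Chars.lowerChar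
  by_cases hu : PySem.Chars.isupper c = true
  · obtain ⟨h0, h1⟩ := upper_bounds hu
    have ht : (Char.ofNat (c.toNat + 32)).toNat = c.toNat + 32 :=
      toNat_ofNat_valid _ (by omega)
    have hl : ¬ ((Char.ofNat (c.toNat + 32)) ≤ '9') := by
      intro h
      have h' : (Char.ofNat (c.toNat + 32)).toNat ≤ 57 := h
      omega
    have hr : ¬ (c ≤ '9') := by
      intro h
      have h' : c.toNat ≤ 57 := h
      omega
    rw [if_pos hu]
    unfold PySem.Chars.isdigit
    simp [hl, hr]
  · rw [if_neg hu]

lemma lowerChar_underscore (c : Char) :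
    (PySem.Chars.lowerChar c == '_') = (c == '_') := by
  unfold PySem.Chars.lowerChar
  by_cases hu : PySem.Chars.isupper c = true
  · obtain ⟨h0, h1⟩ := upper_bounds hu
    have ht : (Char.ofNat (c.toNat + 32)).toNat = c.toNat + 32 :=
      toNat_ofNat_valid _ (by omega)
    have h1' : Char.ofNat (c.toNat + 32) ≠ '_' := by
      intro he
      have hta := congrArg Char.toNat he
      rw [ht] at hta
      simp only [show ('_' : Char).toNat = 95 from rfl] at hta
      omega
    have h2 : c ≠ '_' := by
      intro he
      subst he
      have : ('_' : Char).toNat = 95 := rfl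
      omega
    rw [if_pos hu]
    simp [h1', h2]
  · rw [if_neg hu]

lemma scanDigit_lower (l : List Char) (b : Bool) :
    scanDigit (PySem.Chars.lower l) b = scanDigit l b := by
  induction l generalizing b with
  | nil => rfl
  | cons c rest ih =>
    simp only [PySem.Chars.lower, List.map_cons, scanDigit, isdigit_lowerChar,
      lowerChar_underscore]
    have : PySem.Chars.lower rest = rest.map PySem.Chars.lowerChar := rfl
    rw [← this, ih]

lemma ofList_eq_empty_iff (l : List Char) : (String.ofList l == "") = (l == []) := by
  cases h : (l == []) with
  | true => simp_all
  | false =>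
    simp only [beq_eq_false_iff_ne, ne_eq] at h
    simp only [beq_eq_false_iff_ne, ne_eq]
    intro he
    apply h
    have := congrArg String.toList he
    simpa using this

lemma findDigitTok_map (ts : List (List Char)) :
    findDigitTok (ts.map String.ofList) = ts.any headDigit := by
  induction ts with
  | nil => rfl
  | cons t rest ih =>
    simp only [List.map_cons, findDigitTok, List.any_cons, ofList_eq_empty_iff]
    cases t with
    | nil => simpa [headDigit] using ih
    | cons c tt =>
      have hg : PySem.Str.pyGet? (String.ofList (c :: tt)) 0 = some c := by
        simp [PySem.Str.pyGet?, PySem.Chars.pyGet?_eq_listPyGet?]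
      rw [hg]
      cases hd : PySem.Chars.isdigit c <;> simp [headDigit, hd, ih]

-- the token list A builds, at the char-list level
lemma tokens_eq (column : String) :
    split_tokens (PySem.Str.lower column)
      = ((splitU (PySem.Chars.lower column.toList) []).filter (fun t => !(t == []))).map String.ofList := by
  unfold split_tokens
  have h1 : PySem.Str.split? (PySem.Str.lower column) "_"
      = some (((PySem.Chars.splitOn (PySem.Chars.lower column.toList) ['_'])).map String.ofList) := by
    unfold PySem.Str.split?
    have : (PySem.Str.lower column).toList = PySem.Chars.lower column.toList := by simp
    rw [this]
    have hsep : ("_" : String).toList = ['_'] := rfl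
    rw [hsep]
    unfold PySem.Chars.split?
    simp
  rw [h1, Option.getD_some, splitOn_underscore]
  rw [List.filter_map]
  congr 1
  apply List.filter_congr
  intro t _
  simp [Function.comp, ofList_eq_empty_iff]

-- ===== VERDICT (by name: the statement is the Claim_ definition above) =====
theorem is_item_column_spec : Claim_equal_is_item_column := by
  intro column _
  unfold Spec_is_item_column is_item_column is_item_column_alt
  rw [tokens_eq]
  set lcs := PySem.Chars.lower column.toList with hlcs
  set fts := (splitU lcs []).filter (fun t => !(t == [])) with hfts
  have key : fts.any headDigit = scanDigit column.toList true := by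
    rw [hfts, scan_main]
    simp only [List.reverse_nil, List.isEmpty_nil]
    rw [show headDigit [] = false from rfl, Bool.false_or, hlcs, scanDigit_lower]
  have hnp : ((fts.map String.ofList).head? == some "participant_id") = false := by
    cases h : fts.head? with
    | none => simp [List.head?_map, h]
    | some t =>
      have hmem : t ∈ fts := List.mem_of_mem_head? h
      have hmem' : t ∈ splitU lcs [] := List.mem_of_mem_filter hmem
      have hnu : '_' ∉ t := no_underscore_splitU lcs [] (by simp) t hmem'
      simp only [List.head?_map, h, Option.map_some]
      simp only [beq_eq_false_iff_ne, ne_eq, Option.some.injEq]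
      intro he
      apply hnu
      have := congrArg String.toList he
      simp only [String.toList_ofList] at this
      rw [this]
      decide
  by_cases hemp : (fts.map String.ofList).isEmpty = true
  · rw [if_pos (by simp [hemp])]
    have : fts = [] := by simpa using hemp
    rw [← key, this]
    rfl
  · rw [Bool.not_eq_true] at hemp
    rw [if_neg (by rw [hemp, hnp]; simp)]
    rw [findDigitTok_map, key]
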